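-- pv_equiv track=rewrite | github.com/AMINEXD33/code | codeBackEnd/CODE/jwt_api/consumers_statistics.py | calculate_lines_of_code
-- ===== SOURCE A (Python) =====
-- def calculate_lines_of_code(code: str):
--     """
--     a function that calculates how mush words,lines are in a
--     code, O(n) time complexity O(1) space complexity
--     return (lines, words)
--     """
--     lines: int = 0
--     if len(code) != 0:
--         lines += 1
--     words: int = 0
--     space_break: bool = True
--     for letter in code:
--         if letter == "\n":
--             lines += 1
--         if (letter == " " or letter == "\n") and not space_break:
--             space_break = True
--         if (letter != " " and letter != "\n") and space_break:
--             space_break = False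
--             words += 1
--     return (lines, words)
-- ===== SOURCE B (Python) =====
-- def calculate_lines_of_code(code: str):
--     """Staged string-method re-implementation: lines = newline count (+1 if
--     non-empty); words = number of non-empty tokens after splitting on the
--     explicit separators (space and newline only)."""
--     lines = code.count("\n") + (1 if code else 0)
--     words = len([tok for tok in code.replace("\n", " ").split(" ") if tok])
--     return (lines, words)
-- ===== Notes on version B (the rewrite author's own statement) =====
-- stated objective: faster
-- what changed: Replaces A's single stateful character loop with its space_break flag by staged whole-string operations: lines from counting newline occurrences (plus one for non-empty input), words by replacing newlines with spaces, splitting on the space separator and counting the non-empty tokens.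
import Mathlib
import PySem

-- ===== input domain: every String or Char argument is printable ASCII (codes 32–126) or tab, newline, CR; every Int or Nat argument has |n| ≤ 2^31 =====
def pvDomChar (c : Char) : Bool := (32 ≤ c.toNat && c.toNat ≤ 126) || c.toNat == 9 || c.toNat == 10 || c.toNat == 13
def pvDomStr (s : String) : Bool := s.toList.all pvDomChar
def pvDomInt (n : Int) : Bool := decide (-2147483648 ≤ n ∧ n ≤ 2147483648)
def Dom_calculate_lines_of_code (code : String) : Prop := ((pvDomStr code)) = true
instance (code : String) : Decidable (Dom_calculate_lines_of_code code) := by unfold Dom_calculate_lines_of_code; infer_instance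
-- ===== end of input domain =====

set_option maxRecDepth 8192


-- B replaces A's stateful space_break character loop by staged whole-string operations
-- (newline count; replace, split on the separator, count non-empty tokens); measured faster (constant factor).

-- ===== PORT A =====
-- one step of A's for-loop body over the state (lines, words, space_break)
def pvStepA (st : Int × Int × Bool) (letter : Char) : Int × Int × Bool :=
  let lines := if letter == '\n' then st.1 + 1 else st.1
  let sb := st.2.2
  let sb := if (letter == ' ' || letter == '\n') && !sb then true else sb
  let wsb := if (letter != ' ' && letter != '\n') && sb then (st.2.1 + 1, false) else (st.2.1, sb)
  (lines, wsb.1, wsb.2)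

def calculate_lines_of_code (code : String) : Int × Int :=
  let lines0 : Int := if PySem.Str.len code ≠ 0 then 0 + 1 else 0
  let r := code.toList.foldl pvStepA (lines0, 0, true)
  (r.1, r.2.1)

-- ===== PORT B =====
def calculate_lines_of_code_alt (code : String) : Int × Int :=
  let lines : Int := (PySem.Str.count code "\n" : Int) + (if PySem.Str.len code ≠ 0 then 1 else 0)
  let toks := PySem.Chars.splitOn (PySem.Chars.replace code.toList ['\n'] [' ']) [' ']
  let words : Int := ((toks.filter (fun t => !t.isEmpty)).length : Int)
  (lines, words)

-- ===== PRECONDITION & SPEC =====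
def Spec_calculate_lines_of_code (code : String) (out : Int × Int) : Prop := out = calculate_lines_of_code_alt code
instance (code : String) (out : Int × Int) : Decidable (Spec_calculate_lines_of_code code out) := by unfold Spec_calculate_lines_of_code; infer_instance

-- ===== CLAIM (what is proved, stated in full; the proofs are below) =====
def Claim_equal_calculate_lines_of_code : Prop := ∀ (code : String), Dom_calculate_lines_of_code code → Spec_calculate_lines_of_code code (calculate_lines_of_code code)

-- ===== LEMMAS AND PROOFS =====

-- separator predicate of A ( ' ' or '\n' )
def pvSep (c : Char) : Bool := c == ' ' || c == '\n'

-- word count of a suffix given whether we are currently inside a word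
def pvW (l : List Char) (inword : Bool) : Int :=
  match l with
  | [] => 0
  | c :: t => if pvSep c then pvW t false else (if inword then 0 else 1) + pvW t true

-- A's loop invariant: lines accumulate newline count, words accumulate pvW
lemma pvFoldA (l : List Char) : ∀ (li w : Int) (sb : Bool),
    (l.foldl pvStepA (li, w, sb)).1 = li + (l.countP (fun c => c == '\n') : Int) ∧
    (l.foldl pvStepA (li, w, sb)).2.1 = w + pvW l (!sb) := by
  induction l with
  | nil => intro li w sb; simp [pvW]
  | cons c t ih =>
    intro li w sb
    simp only [List.foldl_cons, List.countP_cons, pvW]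
    by_cases hc : pvSep c = true
    · have hst : pvStepA (li, w, sb) c =
          ((if c == '\n' then li + 1 else li), w, true) := by
        simp only [pvSep, pvStepA] at *
        rcases Bool.eq_false_or_eq_true sb with h | h <;>
          simp_all <;> rcases hc with h' | h' <;> simp [h']
      rw [hst]
      refine ⟨?_, ?_⟩
      · rw [(ih _ _ _).1]
        simp only [pvSep] at hc
        by_cases h : c = '\n' <;> simp_all <;> omega
      · rw [(ih _ _ _).2]; simp [hc]
    · have hns : (c == ' ') = false ∧ (c == '\n') = false := by
        simp only [pvSep] at hc; simp_all
      have hst : pvStepA (li, w, sb) c =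
          (li, (if sb then w + 1 else w), false) := by
        simp only [pvStepA, hns.1, hns.2]
        rcases Bool.eq_false_or_eq_true sb with h | h <;> simp_all
      rw [hst]
      refine ⟨?_, ?_⟩
      · rw [(ih _ _ _).1]; simp [hns.2]
      · rw [(ih _ _ _).2]; simp only [hc]
        rcases Bool.eq_false_or_eq_true sb with h | h <;> simp [h] <;> ring
  -- (induction over the list; each branch replays one iteration of A's body)

-- the character map performed by code.replace("\n", " ")
def pvRepl (c : Char) : Char := if c == '\n' then ' ' else c

-- Chars.replace.go with single-char old/new is a map (fuel ≥ length)
lemma pvReplaceGo (l : List Char) : ∀ (fuel : Nat) (acc : List Char), l.length ≤ fuel →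
    PySem.Chars.replace.go ['\n'] [' '] fuel l acc = acc.reverse ++ l.map pvRepl := by
  induction l with
  | nil => intro fuel acc h; cases fuel <;> simp [PySem.Chars.replace.go]
  | cons c t ih =>
    intro fuel acc h
    cases fuel with
    | zero => simp at h
    | succ f =>
      simp only [PySem.Chars.replace.go, List.isPrefixOf]
      simp only [List.length_cons] at h
      by_cases hc : c = '\n'
      · subst hc
        rw [if_pos (by simp)]
        simp only [List.length_singleton, List.drop_succ_cons, List.drop_zero]
        rw [ih f _ (by omega)]
        simp [pvRepl]
      · rw [if_neg (by simp [Ne.symm hc]), ih f _ (by omega)]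
        simp [pvRepl, hc]

-- Chars.count.go with a single-char needle counts occurrences (fuel ≥ length)
lemma pvCountGo (l : List Char) : ∀ (fuel : Nat) (acc : Nat), l.length ≤ fuel →
    PySem.Chars.count.go ['\n'] fuel l acc = acc + l.count '\n' := by
  induction l with
  | nil => intro fuel acc h; cases fuel <;> simp [PySem.Chars.count.go]
  | cons c t ih =>
    intro fuel acc h
    cases fuel with
    | zero => simp at h
    | succ f =>
      simp only [PySem.Chars.count.go, List.isPrefixOf]
      simp only [List.length_cons] at h
      by_cases hc : c = '\n'
      · subst hc
        rw [if_pos (by simp)]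
        simp only [List.length_singleton, List.drop_succ_cons, List.drop_zero]
        rw [ih f _ (by omega)]
        simp; omega
      · rw [if_neg (by simp [Ne.symm hc]), ih f _ (by omega)]
        simp [hc]

-- structural version of Chars.splitOn.go on a single space
def pvSp (l : List Char) (cur : List Char) : List (List Char) :=
  match l with
  | [] => [cur.reverse]
  | c :: t => if c == ' ' then cur.reverse :: pvSp t [] else pvSp t (c :: cur)

lemma pvSplitOnGo (l : List Char) : ∀ (fuel : Nat) (cur : List Char) (acc : List (List Char)),
    l.length ≤ fuel →
    PySem.Chars.splitOn.go [' '] fuel l cur acc = acc.reverse ++ pvSp l cur := by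
  induction l with
  | nil => intro fuel cur acc h; cases fuel <;> simp [PySem.Chars.splitOn.go, pvSp]
  | cons c t ih =>
    intro fuel cur acc h
    cases fuel with
    | zero => simp at h
    | succ f =>
      simp only [PySem.Chars.splitOn.go, List.isPrefixOf]
      simp only [List.length_cons] at h
      by_cases hc : c = ' '
      · subst hc
        rw [if_pos (by simp)]
        simp only [List.length_singleton, List.drop_succ_cons, List.drop_zero]
        rw [ih f _ _ (by omega)]
        simp [pvSp]
      · rw [if_neg (by simp [Ne.symm hc]), ih f _ _ (by omega)]
        simp [pvSp, hc]

-- pvW over the mapped string, with the single separator ' '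
def pvWm (m : List Char) (inword : Bool) : Int :=
  match m with
  | [] => 0
  | c :: t => if c == ' ' then pvWm t false else (if inword then 0 else 1) + pvWm t true

-- counting the non-empty tokens of pvSp
lemma pvSp_count (m : List Char) : ∀ (cur : List Char),
    (((pvSp m cur).filter (fun t => !t.isEmpty)).length : Int) =
      (if cur.isEmpty then 0 else 1) + pvWm m (!cur.isEmpty) := by
  induction m with
  | nil =>
    intro cur
    cases cur <;> simp [pvSp, pvWm, List.filter]
  | cons c t ih =>
    intro cur
    have h0 : (((pvSp t []).filter (fun t => !t.isEmpty)).length : Int) = pvWm t false := by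
      simpa using ih []
    by_cases hc : c = ' '
    · subst hc
      simp only [pvSp, pvWm, BEq.rfl, if_true, List.filter_cons]
      cases cur with
      | nil => simpa using h0
      | cons a b =>
        rw [if_pos (by simp)]
        simp only [List.length_cons, List.isEmpty_cons, Nat.cast_add, Nat.cast_one, h0]
        simp [add_comm]
    · have hb : (c == ' ') = false := by simp [hc]
      simp only [pvSp, pvWm, hb, Bool.false_eq_true, if_false]
      rw [ih (c :: cur)]
      cases cur <;> simp

-- the replacement map turns A's separators into exactly ' '
lemma pvWm_map (l : List Char) : ∀ (inword : Bool), pvWm (l.map pvRepl) inword = pvW l inword := by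
  induction l with
  | nil => intro _; simp [pvWm, pvW]
  | cons c t ih =>
    intro inword
    by_cases hc : pvSep c = true
    · have h1 : pvRepl c = ' ' := by
        simp only [pvSep, Bool.or_eq_true, beq_iff_eq] at hc
        rcases hc with h | h <;> simp [pvRepl, h]
      simp [pvWm, pvW, h1, hc, ih]
    · have h2 : (c == ' ') = false ∧ (c == '\n') = false := by
        simp only [pvSep, Bool.or_eq_true] at hc
        constructor <;> simp_all
      have h1 : pvRepl c = c := by simp [pvRepl, h2.2]
      simp [pvWm, pvW, h1, h2.1, hc, ih]

-- ===== VERDICT (by name: the statement is the Claim_ definition above) =====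
theorem calculate_lines_of_code_spec : Claim_equal_calculate_lines_of_code := by
  intro code _
  unfold Spec_calculate_lines_of_code
  have hcount : PySem.Str.count code "\n" = code.toList.count '\n' := by
    have hb : ("\n" : String).toList = ['\n'] := rfl
    simp only [PySem.Str.count_eq, hb, PySem.Chars.count]
    rw [if_neg (by simp)]
    simpa using pvCountGo code.toList code.toList.length 0 le_rfl
  have hrep : PySem.Chars.replace code.toList ['\n'] [' '] = code.toList.map pvRepl := by
    simp only [PySem.Chars.replace]
    rw [if_neg (by simp)]
    simpa using pvReplaceGo code.toList code.toList.length [] le_rfl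
  have hsplit : PySem.Chars.splitOn (code.toList.map pvRepl) [' '] = pvSp (code.toList.map pvRepl) [] := by
    simp only [PySem.Chars.splitOn]
    exact pvSplitOnGo (code.toList.map pvRepl) ((code.toList.map pvRepl).length + 1) [] [] (by omega)
  have hA := pvFoldA code.toList (if PySem.Str.len code ≠ 0 then 0 + 1 else 0) 0 true
  have hBv : calculate_lines_of_code_alt code =
      ((code.toList.count '\n' : Int) + (if PySem.Str.len code ≠ 0 then 1 else 0),
       pvW code.toList false) := by
    simp only [calculate_lines_of_code_alt, hcount, hrep, hsplit]
    rw [pvSp_count]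
    simp [pvWm_map]
  rw [hBv]
  unfold calculate_lines_of_code
  refine Prod.ext ?_ ?_
  · show (code.toList.foldl pvStepA _).1 = _
    rw [hA.1, List.count_eq_countP]
    by_cases h : PySem.Str.len code ≠ 0 <;> simp [h] <;> ring
  · show (code.toList.foldl pvStepA _).2.1 = _
    rw [hA.2]
    simp
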